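-- pv_equiv track=rewrite | github.com/wrympa/Kawa-emulator-in-python | bonus-wrymp/scheme_emulator.py | makeanew
-- ===== SOURCE A (Python) =====
-- def makeanew(currcommad, level):
--     retval = ''
--     added = False
--     for i in range(len(currcommad)):
--         if currcommad[i] == ')' and (not added):
--             retval += str(level)
--             retval += ')'
--             added = True
--         else:
--             retval += currcommad[i]
--     return retval
-- ===== SOURCE B (Python) =====
-- def makeanew(currcommad, level):
--     head, sep, tail = currcommad.partition(')')
--     return head + (str(level) + sep if sep else '') + tail
-- ===== Notes on version B (the rewrite author's own statement) =====
-- stated objective: simpler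
-- what changed: Replaces the character-by-character accumulation loop with a flag by a single str.partition at the first ')' and a three-piece splice.
import Mathlib
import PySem

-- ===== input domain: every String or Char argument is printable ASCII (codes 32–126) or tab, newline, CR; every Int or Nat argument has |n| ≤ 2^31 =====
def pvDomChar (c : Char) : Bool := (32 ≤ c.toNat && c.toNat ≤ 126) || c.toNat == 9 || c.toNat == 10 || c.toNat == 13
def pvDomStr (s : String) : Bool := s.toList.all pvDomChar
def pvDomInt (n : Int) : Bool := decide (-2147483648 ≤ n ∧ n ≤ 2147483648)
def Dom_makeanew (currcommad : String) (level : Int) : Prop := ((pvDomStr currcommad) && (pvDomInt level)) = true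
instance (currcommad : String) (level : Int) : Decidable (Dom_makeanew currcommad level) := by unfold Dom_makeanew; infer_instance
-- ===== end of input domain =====

-- B replaces A's character-accumulation loop with a single partition at the first ')' and a three-piece splice (simpler decomposition).


-- ===== PORT A =====
-- A's loop over range(len(currcommad)) indexing currcommad[i], carrying (retval, added);
-- retval is kept as a List Char and turned into a String at the end.
def makeanewStep (level : Int) (st : List Char × Bool) (c : Char) : List Char × Bool :=
  if c = ')' ∧ st.2 = false then (st.1 ++ (PySem.Int.toStr level).toList ++ [')'], true)
  else (st.1 ++ [c], st.2)

def makeanew (currcommad : String) (level : Int) : String :=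
  String.mk (currcommad.toList.foldl (makeanewStep level) ([], false)).1

-- ===== PORT B =====
-- Source B: head, sep, tail = currcommad.partition(')'); return head + (str(level)+sep if sep else '') + tail
-- str.partition is ported by hand (exact): head = chars before the first ')', sep/tail the rest.
def makeanew_alt (currcommad : String) (level : Int) : String :=
  let cs := currcommad.toList
  let head := cs.takeWhile (· ≠ ')')
  match cs.dropWhile (· ≠ ')') with
  | [] => String.mk head
  | sep :: tail => String.mk (head ++ ((PySem.Int.toStr level).toList ++ [sep]) ++ tail)

-- ===== PRECONDITION & SPEC =====
def Spec_makeanew (currcommad : String) (level : Int) (out : String) : Prop := out = makeanew_alt currcommad level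
instance (currcommad : String) (level : Int) (out : String) : Decidable (Spec_makeanew currcommad level out) := by unfold Spec_makeanew; infer_instance

-- ===== CLAIM (what is proved, stated in full; the proofs are below) =====
def Claim_equal_makeanew : Prop := ∀ (currcommad : String) (level : Int), Dom_makeanew currcommad level → Spec_makeanew currcommad level (makeanew currcommad level)

-- ===== LEMMAS AND PROOFS =====

-- once added = true, the loop just copies the remaining characters
theorem makeanew_loop_true (level : Int) (cs acc : List Char) :
    (cs.foldl (makeanewStep level) (acc, true)).1 = acc ++ cs := by
  induction cs generalizing acc with
  | nil => simp
  | cons c cs ih => simp [makeanewStep, ih]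

-- with added = false, the loop copies until the first ')', splices, then copies
theorem makeanew_loop_false (level : Int) (cs acc : List Char) :
    (cs.foldl (makeanewStep level) (acc, false)).1 =
      acc ++ (match cs.dropWhile (· ≠ ')') with
              | [] => cs.takeWhile (· ≠ ')')
              | sep :: tail => cs.takeWhile (· ≠ ')') ++ ((PySem.Int.toStr level).toList ++ [sep]) ++ tail) := by
  induction cs generalizing acc with
  | nil => simp
  | cons c cs ih =>
    by_cases hc : c = ')'
    · subst hc
      simp [makeanewStep, makeanew_loop_true]
    · simp only [List.foldl_cons, makeanewStep]
      rw [if_neg (by simp [hc])]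
      rw [ih]
      simp only [List.takeWhile_cons, List.dropWhile_cons, hc, decide_eq_true_eq,
        ne_eq, not_false_iff, decide_true, if_true, List.append_assoc, List.singleton_append]
      split <;> simp

-- ===== VERDICT (by name: the statement is the Claim_ definition above) =====
theorem makeanew_spec : Claim_equal_makeanew := by
  intro s level _
  unfold Spec_makeanew makeanew makeanew_alt
  rw [makeanew_loop_false]
  simp only [List.nil_append]
  split <;> simp
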